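-- pv_equiv track=rewrite | github.com/krnets/codewars-practice | 7kyu/Insert dashes/kata.py | insert_dash
-- ===== SOURCE A (Python) =====
-- def insert_dash(num):
--     nums = [*map(int, str(num))]
--     res = str(nums[0])
--
--     for i in range(1, len(nums)):
--         if nums[i - 1] % 2 == 1:
--             if nums[i] % 2 == 1:
--                 res += "-" + str(nums[i])
--             else:
--                 res += str(nums[i])
--         else:
--             res += str(nums[i])
--
--     return res
-- ===== SOURCE B (Python) =====
-- ODDS = '13579'
--
-- def insert_dash(num):
--     s = str(num)
--     pieces = []
--     p = s[0] in ODDS          # parity class of the current run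
--     run = s[0]                # current maximal run of same-parity digits
--     for d in s[1:]:
--         if (d in ODDS) == p:
--             run += d
--         else:
--             pieces.append('-'.join(run) if p else run)
--             p, run = not p, d
--     pieces.append('-'.join(run) if p else run)
--     return ''.join(pieces)
-- ===== Notes on version B (the rewrite author's own statement) =====
-- stated objective: alternative
-- what changed: B never compares nums[i-1] with nums[i]: it groups the digit string into maximal runs of equal parity (a run buffer flushed on parity change) and renders each odd run with '-'.join, instead of A's indexed loop that parses the digits to ints and tests each adjacent pair.
import Mathlib
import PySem

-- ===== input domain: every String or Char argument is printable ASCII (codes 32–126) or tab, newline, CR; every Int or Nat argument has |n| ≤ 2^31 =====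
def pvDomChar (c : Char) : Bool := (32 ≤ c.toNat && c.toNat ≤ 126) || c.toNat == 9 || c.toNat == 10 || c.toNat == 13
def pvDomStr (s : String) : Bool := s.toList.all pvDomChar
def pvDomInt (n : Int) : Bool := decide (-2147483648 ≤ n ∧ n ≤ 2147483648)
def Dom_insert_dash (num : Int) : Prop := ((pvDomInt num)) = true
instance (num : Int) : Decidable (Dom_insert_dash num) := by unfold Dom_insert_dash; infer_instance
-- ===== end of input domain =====

-- B groups the digit string into maximal runs of equal parity and renders odd runs with
-- '-'.join, instead of A's indexed loop testing each adjacent pair of parsed ints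
-- (alternative decomposition; return value only, no mutation in either).

-- ===== PORT A =====
-- int(c) for a single character c: exact on digit characters '0'..'9';
-- on '-' (negative num) Python raises ValueError — those inputs are excluded by Pre_insert_dash.
def pvConv (c : Char) : Int := (c.toNat : Int) - 48

def insert_dash (num : Int) : String :=
  let nums : List Int := (PySem.Int.toStr num).toList.map pvConv
  -- str(nums[0]): str(num) is never empty, so nums[0] never raises; pyGetD with default 0 is exact here
  let res := PySem.Int.toStr (PySem.List.pyGetD nums 0 0)
  (PySem.List.pyRange 1 (nums.length : Int) 1).foldl (fun res i =>
    if PySem.Int.mod (PySem.List.pyGetD nums (i - 1) 0) 2 = 1 then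
      if PySem.Int.mod (PySem.List.pyGetD nums i 0) 2 = 1 then
        res ++ "-" ++ PySem.Int.toStr (PySem.List.pyGetD nums i 0)
      else
        res ++ PySem.Int.toStr (PySem.List.pyGetD nums i 0)
    else
      res ++ PySem.Int.toStr (PySem.List.pyGetD nums i 0)) res

-- ===== PORT B =====
def pvOddChars : List Char := ['1', '3', '5', '7', '9']

-- c in ODDS
def pvOdd (c : Char) : Bool := decide (c ∈ pvOddChars)

-- '-'.join(run) if p else run
def pvFlush (p : Bool) (run : List Char) : List Char :=
  if p then PySem.Chars.join ['-'] (run.map (fun x => [x])) else run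

-- the loop body: state = (p, run, pieces)
def pvStep (st : Bool × List Char × List (List Char)) (d : Char) :
    Bool × List Char × List (List Char) :=
  if pvOdd d == st.1 then (st.1, st.2.1 ++ [d], st.2.2)
  else (!st.1, [d], st.2.2 ++ [pvFlush st.1 st.2.1])

def insert_dash_alt (num : Int) : String :=
  match (PySem.Int.toStr num).toList with
  | [] => ""   -- unreachable: str(num) is never empty, so s[0] never raises
  | c :: t =>
    let fin := t.foldl pvStep (pvOdd c, [c], [])
    String.ofList (PySem.Chars.join [] (fin.2.2 ++ [pvFlush fin.1 fin.2.1]))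

-- ===== PRECONDITION & SPEC =====
-- Pre_ excludes exactly the negative num, on which A's map(int, str(num)) raises ValueError at the '-' sign.
def Pre_insert_dash (num : Int) : Prop := 0 ≤ num
instance (num : Int) : Decidable (Pre_insert_dash num) := by unfold Pre_insert_dash; infer_instance
def pvWitness_insert_dash : Int := (13)

def Spec_insert_dash (num : Int) (out : String) : Prop := out = insert_dash_alt num
instance (num : Int) (out : String) : Decidable (Spec_insert_dash num out) := by unfold Spec_insert_dash; infer_instance

-- ===== CLAIM (what is proved, stated in full; the proofs are below) =====
def Claim_equal_insert_dash : Prop := ∀ (num : Int), Dom_insert_dash num → Pre_insert_dash num → Spec_insert_dash num (insert_dash num)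

-- ===== LEMMAS AND PROOFS =====

def pvDigits : List Char := ['0', '1', '2', '3', '4', '5', '6', '7', '8', '9']

-- what both programs compute after the first digit (string / char-list form)
def pvRest (c : Char) : List Char → String
  | [] => ""
  | d :: t => (if c ∈ pvOddChars ∧ d ∈ pvOddChars then "-" else "") ++ String.ofList [d] ++ pvRest d t

def pvRestL (c : Char) : List Char → List Char
  | [] => []
  | d :: t => (if c ∈ pvOddChars ∧ d ∈ pvOddChars then ['-'] else []) ++ [d] ++ pvRestL d t

lemma pvRest_eq_ofList_restL : ∀ (t : List Char) (c : Char),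
    pvRest c t = String.ofList (pvRestL c t) := by
  intro t
  induction t with
  | nil => intro c; rfl
  | cons d t' ih =>
    intro c
    rw [pvRest, pvRestL, String.ofList_append, String.ofList_append, ih d]
    split_ifs <;> rfl

lemma mem_toDigitsCore (f : Nat) : ∀ (n : Nat) (ds : List Char) (x : Char),
    x ∈ Nat.toDigitsCore 10 f n ds → x ∈ ds ∨ x ∈ pvDigits := by
  induction f with
  | zero => intro n ds x h; simp [Nat.toDigitsCore] at h; exact Or.inl h
  | succ f ih =>
    intro n ds x h
    have hd : (n % 10).digitChar ∈ pvDigits := by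
      have h10 : n % 10 < 10 := Nat.mod_lt _ (by norm_num)
      revert h10; generalize n % 10 = m; intro h10
      interval_cases m <;> decide
    rw [Nat.toDigitsCore] at h
    split at h
    · rw [List.mem_cons] at h
      rcases h with rfl | h
      · exact Or.inr hd
      · exact Or.inl h
    · rcases ih _ _ _ h with h | h
      · rw [List.mem_cons] at h
        rcases h with rfl | h
        · exact Or.inr hd
        · exact Or.inl h
      · exact Or.inr h

lemma toDigitsCore_eq_nil (f : Nat) : ∀ (n : Nat) (ds : List Char),
    Nat.toDigitsCore 10 f n ds = [] → ds = [] ∧ f = 0 := by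
  induction f with
  | zero => intro n ds h; simp [Nat.toDigitsCore] at h; exact ⟨h, rfl⟩
  | succ f ih =>
    intro n ds h
    rw [Nat.toDigitsCore] at h
    split at h
    · simp at h
    · exact absurd (ih _ _ h).1 (by simp)

lemma conv_toStr {c : Char} (h : c ∈ pvDigits) : PySem.Int.toStr (pvConv c) = String.ofList [c] := by
  fin_cases h <;> decide

lemma conv_mod {c : Char} (h : c ∈ pvDigits) :
    (PySem.Int.mod (pvConv c) 2 = 1) ↔ c ∈ pvOddChars := by
  fin_cases h <;> decide

lemma pyGetD_cons_succ {α : Type} (x : α) (xs : List α) (j : Int) (hj : 0 ≤ j) (d : α) :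
    PySem.List.pyGetD (x :: xs) (j + 1) d = PySem.List.pyGetD xs j d := by
  rw [PySem.List.pyGetD_of_nonneg _ _ (by omega), PySem.List.pyGetD_of_nonneg _ _ hj]
  have h1 : (j + 1).toNat = j.toNat + 1 := by omega
  simp [h1]

lemma A_core : ∀ (t : List Char) (c : Char) (res : String), (∀ x ∈ c :: t, x ∈ pvDigits) →
    (PySem.List.pyRange 1 (((c :: t).map pvConv).length : Int) 1).foldl (fun res i =>
      if PySem.Int.mod (PySem.List.pyGetD ((c :: t).map pvConv) (i - 1) 0) 2 = 1 then
        if PySem.Int.mod (PySem.List.pyGetD ((c :: t).map pvConv) i 0) 2 = 1 then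
          res ++ "-" ++ PySem.Int.toStr (PySem.List.pyGetD ((c :: t).map pvConv) i 0)
        else
          res ++ PySem.Int.toStr (PySem.List.pyGetD ((c :: t).map pvConv) i 0)
      else
        res ++ PySem.Int.toStr (PySem.List.pyGetD ((c :: t).map pvConv) i 0)) res
    = res ++ pvRest c t := by
  intro t
  induction t with
  | nil =>
    intro c res _
    rw [show (((c :: ([] : List Char)).map pvConv).length : Int) = 1 by simp]
    rw [PySem.List.pyRange_one_eq_nil (by omega)]
    simp [pvRest]
  | cons d t' ih =>
    intro c res hall
    have hc : c ∈ pvDigits := hall c (by simp)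
    have hd : d ∈ pvDigits := hall d (by simp)
    have hn : (((c :: d :: t').map pvConv).length : Int) = (t'.length : Int) + 2 := by
      simp; omega
    rw [hn, PySem.List.pyRange_one_cons (by omega), List.foldl_cons, show (1:Int)+1 = 2 from by norm_num]
    have hg0 : PySem.List.pyGetD ((c :: d :: t').map pvConv) ((1:Int) - 1) 0 = pvConv c := by
      norm_num [PySem.List.pyGetD_of_nonneg]
    have hg1 : PySem.List.pyGetD ((c :: d :: t').map pvConv) (1:Int) 0 = pvConv d := by
      rw [PySem.List.pyGetD_of_nonneg _ _ (by omega)]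
      simp
    rw [hg0, hg1, conv_toStr hd]
    have hinit : (if PySem.Int.mod (pvConv c) 2 = 1 then
        if PySem.Int.mod (pvConv d) 2 = 1 then res ++ "-" ++ String.ofList [d]
        else res ++ String.ofList [d]
      else res ++ String.ofList [d])
      = res ++ ((if c ∈ pvOddChars ∧ d ∈ pvOddChars then "-" else "") ++ String.ofList [d]) := by
      simp only [conv_mod hc, conv_mod hd]
      split_ifs with h1 h2 h3 <;> simp_all [String.append_assoc]
    rw [hinit]
    have hsh : ∀ r : String, (PySem.List.pyRange 2 ((t'.length : Int) + 2) 1).foldl (fun res i =>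
        if PySem.Int.mod (PySem.List.pyGetD ((c :: d :: t').map pvConv) (i - 1) 0) 2 = 1 then
          if PySem.Int.mod (PySem.List.pyGetD ((c :: d :: t').map pvConv) i 0) 2 = 1 then
            res ++ "-" ++ PySem.Int.toStr (PySem.List.pyGetD ((c :: d :: t').map pvConv) i 0)
          else
            res ++ PySem.Int.toStr (PySem.List.pyGetD ((c :: d :: t').map pvConv) i 0)
        else
          res ++ PySem.Int.toStr (PySem.List.pyGetD ((c :: d :: t').map pvConv) i 0)) r
      = (PySem.List.pyRange 1 ((((d :: t').map pvConv).length : Int)) 1).foldl (fun res i =>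
        if PySem.Int.mod (PySem.List.pyGetD ((d :: t').map pvConv) (i - 1) 0) 2 = 1 then
          if PySem.Int.mod (PySem.List.pyGetD ((d :: t').map pvConv) i 0) 2 = 1 then
            res ++ "-" ++ PySem.Int.toStr (PySem.List.pyGetD ((d :: t').map pvConv) i 0)
          else
            res ++ PySem.Int.toStr (PySem.List.pyGetD ((d :: t').map pvConv) i 0)
        else
          res ++ PySem.Int.toStr (PySem.List.pyGetD ((d :: t').map pvConv) i 0)) r := by
      intro r
      rw [PySem.List.pyRange_one, PySem.List.pyRange_one, List.foldl_map, List.foldl_map]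
      have e1 : ((t'.length : Int) + 2 - 2).toNat = t'.length := by omega
      have e2 : ((((d :: t').map pvConv).length : Int) - 1).toNat = t'.length := by
        simp
      rw [e1, e2]
      apply PySem.List.foldl_congr_mem
      intro acc k _
      have gA : PySem.List.pyGetD ((c :: d :: t').map pvConv) (2 + (k : Int) - 1) 0
          = PySem.List.pyGetD ((d :: t').map pvConv) (1 + (k : Int) - 1) 0 := by
        have h1 : (2 : Int) + (k : Int) - 1 = (k : Int) + 1 := by omega
        have h2 : (1 : Int) + (k : Int) - 1 = (k : Int) := by omega
        rw [h1, h2, List.map_cons, pyGetD_cons_succ _ _ _ (by omega)]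
      have gB : PySem.List.pyGetD ((c :: d :: t').map pvConv) (2 + (k : Int)) 0
          = PySem.List.pyGetD ((d :: t').map pvConv) (1 + (k : Int)) 0 := by
        have h3 : (2 : Int) + (k : Int) = (1 + (k : Int)) + 1 := by omega
        rw [h3, List.map_cons, pyGetD_cons_succ _ _ _ (by omega)]
      simp only [gA, gB]
    rw [hsh]
    rw [ih d _ (fun x hx => hall x (List.mem_cons_of_mem c hx))]
    simp [pvRest, String.append_assoc]

-- ''.join over a list of pieces is concatenation
lemma joinE : ∀ (parts : List (List Char)), PySem.Chars.join [] parts = parts.flatten := by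
  intro parts
  induction parts with
  | nil => rfl
  | cons a l ih =>
    cases l with
    | nil => simp [PySem.Chars.join_singleton]
    | cons b m => rw [PySem.Chars.join_cons_cons]; simp_all

lemma join_map_append : ∀ (run : List Char) (d : Char), run ≠ [] →
    PySem.Chars.join ['-'] ((run ++ [d]).map (fun x => [x]))
      = PySem.Chars.join ['-'] (run.map (fun x => [x])) ++ ['-', d] := by
  intro run
  induction run with
  | nil => intro d h; exact absurd rfl h
  | cons a m ih =>
    intro d _
    cases m with
    | nil => simp [PySem.Chars.join_cons_cons, PySem.Chars.join_singleton]
    | cons b m' =>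
      have h1 := ih d (by simp)
      simp only [List.cons_append, List.map_cons] at h1 ⊢
      rw [PySem.Chars.join_cons_cons, PySem.Chars.join_cons_cons, h1]
      simp

lemma flush_append (p : Bool) (run : List Char) (d : Char) (h : run ≠ []) :
    pvFlush p (run ++ [d]) = pvFlush p run ++ (if p then ['-', d] else [d]) := by
  cases p with
  | false => simp [pvFlush]
  | true => simpa [pvFlush] using join_map_append run d h

lemma flush_singleton (p : Bool) (c : Char) : pvFlush p [c] = [c] := by
  cases p <;> simp [pvFlush, PySem.Chars.join_singleton]

-- the loop invariant: run is the current nonempty run, c its last char, p its parity class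
lemma B_fold : ∀ (t : List Char) (p : Bool) (run : List Char) (pieces : List (List Char)) (c : Char),
    run ≠ [] → run.getLast? = some c → p = pvOdd c →
    PySem.Chars.join [] ((t.foldl pvStep (p, run, pieces)).2.2
        ++ [pvFlush (t.foldl pvStep (p, run, pieces)).1 (t.foldl pvStep (p, run, pieces)).2.1])
      = PySem.Chars.join [] (pieces ++ [pvFlush p run]) ++ pvRestL c t := by
  intro t
  induction t with
  | nil => intro p run pieces c _ _ _; simp [pvRestL]
  | cons d t' ih =>
    intro p run pieces c hne hlast hp
    rw [List.foldl_cons]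
    by_cases hd : pvOdd d = p
    · have hstep : pvStep (p, run, pieces) d = (p, run ++ [d], pieces) := by
        simp [pvStep, hd]
      rw [hstep, ih p (run ++ [d]) pieces d (by simp) (by simp) (by rw [hd])]
      rw [joinE, joinE, pvRestL]
      rw [flush_append p run d hne]
      have hdash : (if p then ['-', d] else [d])
          = (if c ∈ pvOddChars ∧ d ∈ pvOddChars then ['-'] else []) ++ [d] := by
        cases hpv : pvOdd c with
        | true =>
          have hc : c ∈ pvOddChars := by simpa [pvOdd] using hpv
          have hdm : d ∈ pvOddChars := by
            have : pvOdd d = true := by rw [hd, hp, hpv]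
            simpa [pvOdd] using this
          simp [hp, hpv, hc, hdm]
        | false =>
          have hc : c ∉ pvOddChars := by simpa [pvOdd] using hpv
          simp [hp, hpv, hc]
      rw [hdash]
      simp
    · have hstep : pvStep (p, run, pieces) d = (!p, [d], pieces ++ [pvFlush p run]) := by
        simp [pvStep, hd]
      have hpd : pvOdd d = !p := by
        cases hb : pvOdd d <;> cases hq : p <;> simp_all
      rw [hstep, ih (!p) [d] (pieces ++ [pvFlush p run]) d (by simp) (by simp) hpd.symm]
      rw [joinE, joinE, pvRestL]
      have hdash : (if c ∈ pvOddChars ∧ d ∈ pvOddChars then ['-'] else []) = [] := by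
        have : ¬ (c ∈ pvOddChars ∧ d ∈ pvOddChars) := by
          rintro ⟨hc, hdm⟩
          have h1 : pvOdd c = true := by simpa [pvOdd] using hc
          have h2 : pvOdd d = true := by simpa [pvOdd] using hdm
          rw [hp, h1] at hd
          exact hd h2
        simp [this]
      rw [hdash, flush_singleton]
      simp

-- ===== VERDICT (by name: the statement is the Claim_ definition above) =====
theorem insert_dash_spec : Claim_equal_insert_dash := by
  intro num _ hpre
  unfold Pre_insert_dash at hpre
  unfold Spec_insert_dash
  have htc : PySem.Int.toChars num = Nat.toDigits 10 num.toNat := by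
    rw [PySem.Int.toChars, if_neg (by omega)]
  have hne : (PySem.Int.toStr num).toList ≠ [] := by
    rw [PySem.Int.toList_toStr, htc, Nat.toDigits]
    intro h
    exact absurd (toDigitsCore_eq_nil _ _ _ h).2 (by omega)
  obtain ⟨c, t, hE⟩ := List.exists_cons_of_ne_nil hne
  have hdig : ∀ x ∈ c :: t, x ∈ pvDigits := by
    intro x hx
    rw [← hE, PySem.Int.toList_toStr, htc, Nat.toDigits] at hx
    rcases mem_toDigitsCore _ _ _ _ hx with h | h
    · simp at h
    · exact h
  have hc : c ∈ pvDigits := hdig c (by simp)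
  have hg : PySem.List.pyGetD ((c :: t).map pvConv) 0 0 = pvConv c := by
    rw [PySem.List.pyGetD_of_nonneg _ _ (by omega)]
    simp
  simp only [insert_dash, insert_dash_alt, hE]
  rw [hg, conv_toStr hc, A_core t c _ hdig]
  rw [B_fold t (pvOdd c) [c] [] c (by simp) (by simp) rfl]
  rw [joinE, flush_singleton]
  rw [pvRest_eq_ofList_restL, ← String.ofList_append]
  rfl
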